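-- pv_equiv track=rewrite | github.com/Kaastor/road-to-ai-coding | research/spetral-invariance/spectral_qnn/maximality/golomb_generators.py | _backtrack_golomb
-- ===== SOURCE A (Python) =====
-- from typing import List, Tuple, Dict, Set, Optional
--
-- def _backtrack_golomb(order: int, max_length: int) -> Optional[List[int]]:
--     """Backtracking search for Golomb ruler."""
--     def is_valid_partial(marks: List[int]) -> bool:
--         """Check if partial ruler has unique differences."""
--         differences = set()
--         for i in range(len(marks)):
--             for j in range(i + 1, len(marks)):
--                 diff = marks[j] - marks[i]
--                 if diff in differences:
--                     return False
--                 differences.add(diff)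
--         return True
--
--     def backtrack(marks: List[int], remaining: int) -> Optional[List[int]]:
--         if remaining == 0:
--             return marks[:]
--
--         start = marks[-1] + 1 if marks else 0
--         for pos in range(start, max_length + 1):
--             marks.append(pos)
--             if is_valid_partial(marks):
--                 result = backtrack(marks, remaining - 1)
--                 if result is not None:
--                     return result
--             marks.pop()
--         return None
--
--     return backtrack([0], order - 1)
-- ===== SOURCE B (Python) =====
-- from typing import List, Optional
--
-- def _backtrack_golomb(order: int, max_length: int) -> Optional[List[int]]:
--     """Golomb ruler search: single recursion, first-success over candidate
--     positions, carrying the pairwise-difference set forward (only the new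
--     mark's differences are tested against it; no full re-check, no undo)."""
--     def attempt(marks, diffs, pos):
--         new = [pos - m for m in marks]
--         if diffs.isdisjoint(new):
--             return extend(marks + [pos], diffs | set(new))
--         return None
--
--     def extend(marks, diffs):
--         if len(marks) == order:
--             return marks
--         return next(
--             (r for r in (attempt(marks, diffs, pos)
--                          for pos in range(marks[-1] + 1, max_length + 1))
--              if r is not None),
--             None)
--
--     return extend([0], set())
-- ===== Notes on version B (the rewrite author's own statement) =====
-- stated objective: alternative
-- what changed: A is a mutual pair (backtrack + a for-loop) that rebuilds the whole pairwise-difference set and re-checks all O(k^2) pairs at every search node; B is a single recursion that carries the difference set forward through the search, takes the first success over the candidate positions, and tests only the k differences of the new mark against the carried set (marks are strictly increasing, so those are distinct among themselves); same search order, same result.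
import Mathlib
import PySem

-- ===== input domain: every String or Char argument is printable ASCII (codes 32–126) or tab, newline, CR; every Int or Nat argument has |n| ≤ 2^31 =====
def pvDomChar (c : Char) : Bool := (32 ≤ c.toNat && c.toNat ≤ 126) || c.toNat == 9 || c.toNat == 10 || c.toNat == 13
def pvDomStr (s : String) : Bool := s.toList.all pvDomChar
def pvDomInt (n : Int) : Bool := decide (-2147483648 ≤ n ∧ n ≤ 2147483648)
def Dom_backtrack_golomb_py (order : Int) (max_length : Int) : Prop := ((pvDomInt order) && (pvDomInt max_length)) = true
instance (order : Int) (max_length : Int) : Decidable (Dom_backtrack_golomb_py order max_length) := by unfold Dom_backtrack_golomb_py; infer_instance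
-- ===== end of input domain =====

-- B replaces A's mutual "recurse + re-check all O(k^2) pairwise differences at every node" search
-- by a single recursion that carries the pairwise-difference set forward and takes the first
-- success over the candidate positions, testing only the new mark's differences; same search
-- order, same result.

-- ===== PORT A =====
-- start position of the for-loop: marks[-1] + 1 if marks else 0
def pvStart (marks : List Int) : Int :=
  match marks.getLast? with
  | some m => m + 1
  | none => 0

-- inner j-loop of is_valid_partial (over the marks after mi), threading `differences`;
-- none = early `return False`
def pvValidInner (differences : PySem.Set Int) (mi : Int) (rest : List Int) :
    Option (PySem.Set Int) :=
  match rest with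
  | [] => some differences
  | mj :: tl =>
    let diff := mj - mi
    if PySem.Set.contains differences diff then none
    else pvValidInner (PySem.Set.add differences diff) mi tl

-- outer i-loop of is_valid_partial
def pvValidOuter (differences : PySem.Set Int) (marks : List Int) : Bool :=
  match marks with
  | [] => true
  | mi :: tl =>
    match pvValidInner differences mi tl with
    | none => false
    | some d' => pvValidOuter d' tl

def pvIsValidPartial (marks : List Int) : Bool := pvValidOuter PySem.Set.empty marks

-- termination helper, cited by the recursive definitions below
theorem pvStart_concat (marks : List Int) (pos : Int) : pvStart (marks ++ [pos]) = pos + 1 := by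
  simp [pvStart]

mutual
-- `backtrack(marks, remaining)` of A
def pvBtA (ml : Int) (marks : List Int) (remaining : Int) : Option (List Int) :=
  if remaining = 0 then some marks
  else pvLoopA ml marks remaining (pvStart marks)
termination_by 2 * (ml + 1 - pvStart marks).toNat + 2
decreasing_by omega

-- the `for pos in range(start, max_length + 1)` loop of A's backtrack
def pvLoopA (ml : Int) (marks : List Int) (remaining : Int) (pos : Int) : Option (List Int) :=
  if h : pos ≤ ml then
    if pvIsValidPartial (marks ++ [pos]) then
      match pvBtA ml (marks ++ [pos]) (remaining - 1) with
      | some r => some r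
      | none => pvLoopA ml marks remaining (pos + 1)
    else pvLoopA ml marks remaining (pos + 1)
  else none
termination_by 2 * (ml + 1 - pos).toNat + 1
decreasing_by all_goals (try rw [pvStart_concat]); all_goals omega
end

def backtrack_golomb_py (order : Int) (max_length : Int) : Option (List Int) :=
  pvBtA max_length [0] (order - 1)

-- ===== PORT B =====
-- marks[-1]; in B `marks` is never empty (it starts as [0] and only grows)
def pvLast (marks : List Int) : Int := marks.getLast?.getD 0

-- termination helper, cited by pvExtend
theorem pvLast_concat (marks : List Int) (pos : Int) : pvLast (marks ++ [pos]) = pos := by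
  simp [pvLast]

-- `extend(marks, diffs)` of B; `attempt` is the inner lambda; `next((... if r is not None), None)`
-- is the first-success scan `findSome?` over the candidate positions
def pvExtend (order : Int) (ml : Int) (marks : List Int) (diffs : PySem.Set Int) :
    Option (List Int) :=
  if (marks.length : Int) = order then some marks
  else
    (PySem.List.pyRange (pvLast marks + 1) (ml + 1) 1).attach.findSome? (fun p =>
      let news := marks.map (fun m => p.1 - m)
      if PySem.Set.isdisjoint diffs news then
        pvExtend order ml (marks ++ [p.1]) (PySem.Set.union diffs (PySem.Set.ofList news))
      else none)
termination_by (ml - pvLast marks).toNat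
decreasing_by
  have h := (PySem.List.mem_pyRange_one).mp p.2
  rw [pvLast_concat]
  omega

def backtrack_golomb_py_alt (order : Int) (max_length : Int) : Option (List Int) :=
  pvExtend order max_length [0] PySem.Set.empty

-- ===== PRECONDITION & SPEC =====
def Spec_backtrack_golomb_py (order : Int) (max_length : Int) (out : Option (List Int)) : Prop := out = backtrack_golomb_py_alt order max_length
instance (order : Int) (max_length : Int) (out : Option (List Int)) : Decidable (Spec_backtrack_golomb_py order max_length out) := by unfold Spec_backtrack_golomb_py; infer_instance

-- ===== CLAIM (what is proved, stated in full; the proofs are below) =====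
def Claim_equal_backtrack_golomb_py : Prop := ∀ (order : Int) (max_length : Int), Dom_backtrack_golomb_py order max_length → Spec_backtrack_golomb_py order max_length (backtrack_golomb_py order max_length)

-- ===== LEMMAS AND PROOFS =====

-- all pairwise differences marks[j] - marks[i] (i < j), in A's traversal order
def pvDiffList : List Int → List Int
  | [] => []
  | m :: tl => tl.map (fun x => x - m) ++ pvDiffList tl

-- sequential insertion with early failure on a repeat (shape of pvValidInner)
def pvScan (diffs : PySem.Set Int) : List Int → Option (PySem.Set Int)
  | [] => some diffs
  | d :: tl => if PySem.Set.contains diffs d then none else pvScan (PySem.Set.add diffs d) tl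

theorem pvValidInner_eq_scan (mi : Int) (rest : List Int) (diffs : PySem.Set Int) :
    pvValidInner diffs mi rest = pvScan diffs (rest.map (fun x => x - mi)) := by
  induction rest generalizing diffs with
  | nil => rfl
  | cons mj tl ih => simp [pvValidInner, pvScan, ih]

theorem pv_nodup_append (l1 l2 : List Int) :
    (l1 ++ l2).Nodup ↔ l1.Nodup ∧ l2.Nodup ∧ ∀ a ∈ l1, a ∉ l2 := by
  rw [List.nodup_append]
  constructor
  · rintro ⟨h1, h2, hd⟩
    exact ⟨h1, h2, fun a ha hb => hd a ha a hb rfl⟩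
  · rintro ⟨h1, h2, hd⟩
    exact ⟨h1, h2, fun a ha b hb e => hd a ha (e ▸ hb)⟩

theorem pvScan_isSome (l : List Int) : ∀ diffs : PySem.Set Int,
    (pvScan diffs l).isSome = true ↔ l.Nodup ∧ ∀ d ∈ l, d ∉ diffs := by
  induction l with
  | nil => simp [pvScan]
  | cons d tl ih =>
    intro diffs
    by_cases hc : PySem.Set.contains diffs d = true
    · have hcm : d ∈ diffs := (PySem.Set.contains_iff _ _).1 hc
      rw [pvScan, if_pos hc]
      simp only [Option.isSome_none, Bool.false_eq_true, false_iff]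
      rintro ⟨_, h⟩
      exact absurd hcm (h d (by simp))
    · have hd : d ∉ diffs := fun hmem => hc ((PySem.Set.contains_iff _ _).2 hmem)
      rw [pvScan, if_neg hc, ih, List.nodup_cons]
      constructor
      · rintro ⟨hnd, hall⟩
        refine ⟨⟨?_, hnd⟩, ?_⟩
        · intro hdt
          have := hall d hdt
          rw [PySem.Set.mem_add] at this
          exact this (Or.inr rfl)
        · rintro e he
          rcases List.mem_cons.1 he with rfl | he'
          · exact hd
          · intro hediffs
            exact hall e he' (by rw [PySem.Set.mem_add]; exact Or.inl hediffs)
      · rintro ⟨⟨hdt, hnd⟩, hall⟩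
        refine ⟨hnd, fun e he hmem => ?_⟩
        rw [PySem.Set.mem_add] at hmem
        rcases hmem with hmem | rfl
        · exact hall e (List.mem_cons.2 (Or.inr he)) hmem
        · exact hdt he

theorem pvScan_mem (l : List Int) : ∀ (diffs d' : PySem.Set Int),
    pvScan diffs l = some d' → ∀ x : Int, x ∈ d' ↔ x ∈ diffs ∨ x ∈ l := by
  induction l with
  | nil =>
    intro diffs d' h x
    simp [pvScan] at h
    simp [← h]
  | cons d tl ih =>
    intro diffs d' h x
    by_cases hc : PySem.Set.contains diffs d = true
    · rw [pvScan, if_pos hc] at h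
      cases h
    · rw [pvScan, if_neg hc] at h
      have := ih _ _ h x
      rw [this, PySem.Set.mem_add]
      simp
      tauto

theorem pvValidOuter_iff (marks : List Int) : ∀ diffs : PySem.Set Int,
    pvValidOuter diffs marks = true ↔
      (pvDiffList marks).Nodup ∧ ∀ d ∈ pvDiffList marks, d ∉ diffs := by
  induction marks with
  | nil => simp [pvValidOuter, pvDiffList]
  | cons m tl ih =>
    intro diffs
    rw [pvValidOuter, pvValidInner_eq_scan]
    rcases hscan : pvScan diffs (tl.map (fun x => x - m)) with _ | d'
    · have hbad : ¬ ((tl.map (fun x => x - m)).Nodup ∧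
          ∀ d ∈ tl.map (fun x => x - m), d ∉ diffs) := by
        rw [← pvScan_isSome]; simp [hscan]
      simp only [pvDiffList, pv_nodup_append, List.mem_append]
      constructor
      · intro h; cases h
      · rintro ⟨⟨hn1, hn2, hdisj⟩, hall⟩
        exact absurd ⟨hn1, fun d hd => hall d (Or.inl hd)⟩ hbad
    · have hmem := pvScan_mem _ _ _ hscan
      have hok : (tl.map (fun x => x - m)).Nodup ∧
          ∀ d ∈ tl.map (fun x => x - m), d ∉ diffs := by
        rw [← pvScan_isSome]; simp [hscan]
      rw [ih d']
      simp only [pvDiffList, pv_nodup_append, List.mem_append]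
      constructor
      · rintro ⟨hnd, hall⟩
        refine ⟨⟨hok.1, hnd, fun a ha hat => hall a hat ((hmem a).2 (Or.inr ha))⟩, ?_⟩
        rintro d (hd | hd)
        · exact hok.2 d hd
        · intro hdm
          exact hall d hd ((hmem d).2 (Or.inl hdm))
      · rintro ⟨⟨hn1, hn2, hdisj⟩, hall⟩
        refine ⟨hn2, fun d hd hmem' => ?_⟩
        rcases (hmem d).1 hmem' with h | h
        · exact hall d (Or.inr hd) h
        · exact hdisj d h hd

theorem pvIsValidPartial_iff (marks : List Int) :
    pvIsValidPartial marks = true ↔ (pvDiffList marks).Nodup := by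
  rw [pvIsValidPartial, pvValidOuter_iff]
  simp [PySem.Set.empty]

theorem pvDiffList_concat (marks : List Int) (pos : Int) :
    (pvDiffList (marks ++ [pos])).Perm
      (pvDiffList marks ++ marks.map (fun m => pos - m)) := by
  induction marks with
  | nil => simp [pvDiffList]
  | cons m tl ih =>
    simp only [List.cons_append, pvDiffList, List.map_append, List.map_cons, List.map_nil]
    rw [List.perm_iff_count]
    rw [List.perm_iff_count] at ih
    intro a
    have := ih a
    simp [List.count_append, List.count_cons] at *
    omega

-- the invariant of B's recursion: marks is a nonempty, strictly increasing Golomb prefix and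
-- diffs is exactly its set of pairwise differences
def pvInv (marks : List Int) (diffs : PySem.Set Int) : Prop :=
  marks ≠ [] ∧ marks.Pairwise (· < ·) ∧ (pvDiffList marks).Nodup ∧
    ∀ x : Int, x ∈ diffs ↔ x ∈ pvDiffList marks

theorem pvStart_eq_last (marks : List Int) (h : marks ≠ []) :
    pvStart marks = pvLast marks + 1 := by
  rcases hl : marks.getLast? with _ | m
  · exact absurd (List.getLast?_eq_none_iff.mp hl) h
  · simp [pvStart, pvLast, hl]

theorem pv_mem_le_last (marks : List Int) (hp : marks.Pairwise (· < ·)) :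
    ∀ m ∈ marks, m ≤ pvLast marks := by
  induction marks with
  | nil => intro m hm; cases hm
  | cons a tl ih =>
    rcases List.pairwise_cons.1 hp with ⟨ha, htl⟩
    intro m hm
    rcases tl with _ | ⟨b, tl'⟩
    · rcases List.mem_singleton.1 hm with rfl
      simp [pvLast]
    · have hlast : pvLast (a :: b :: tl') = pvLast (b :: tl') := by
        simp [pvLast, List.getLast?_cons_cons]
      rw [hlast]
      rcases List.mem_cons.1 hm with rfl | hm'
      · exact le_of_lt (lt_of_lt_of_le (ha b (by simp))
          (ih htl b (by simp)))
      · exact ih htl m hm'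

theorem pvNews_nodup (marks : List Int) (pos : Int) (hp : marks.Pairwise (· < ·)) :
    (marks.map (fun m => pos - m)).Nodup := by
  rw [List.nodup_iff_pairwise_ne, List.pairwise_map]
  exact hp.imp (fun {a b} h => by omega)

-- A's full validity re-check of marks ++ [pos] agrees with B's disjointness test
theorem pvCheck_agree (marks : List Int) (diffs : PySem.Set Int) (pos : Int)
    (hinv : pvInv marks diffs) :
    pvIsValidPartial (marks ++ [pos])
      = PySem.Set.isdisjoint diffs (marks.map (fun m => pos - m)) := by
  obtain ⟨hne, hp, hnd, hdm⟩ := hinv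
  have hchar : pvIsValidPartial (marks ++ [pos]) = true ↔
      ∀ a ∈ pvDiffList marks, a ∉ marks.map (fun m => pos - m) := by
    rw [pvIsValidPartial_iff, (pvDiffList_concat marks pos).nodup_iff, pv_nodup_append]
    exact ⟨fun h => h.2.2, fun h => ⟨hnd, pvNews_nodup marks pos hp, h⟩⟩
  have hdis : PySem.Set.isdisjoint diffs (marks.map (fun m => pos - m)) = true ↔
      ∀ a ∈ pvDiffList marks, a ∉ marks.map (fun m => pos - m) := by
    rw [PySem.Set.isdisjoint_iff]
    exact ⟨fun h a ha => h a ((hdm a).2 ha), fun h a ha => h a ((hdm a).1 ha)⟩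
  by_cases h : ∀ a ∈ pvDiffList marks, a ∉ marks.map (fun m => pos - m)
  · rw [hchar.2 h, hdis.2 h]
  · rw [Bool.eq_iff_iff, hchar, hdis]

theorem pvInv_step (marks : List Int) (diffs : PySem.Set Int) (pos : Int)
    (hinv : pvInv marks diffs) (hlt : pvLast marks < pos)
    (hvalid : pvIsValidPartial (marks ++ [pos]) = true) :
    pvInv (marks ++ [pos])
      (PySem.Set.union diffs (PySem.Set.ofList (marks.map (fun m => pos - m)))) := by
  obtain ⟨hne, hp, hnd, hdm⟩ := hinv
  refine ⟨by simp, ?_, (pvIsValidPartial_iff _).1 hvalid, fun x => ?_⟩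
  · rw [List.pairwise_append]
    refine ⟨hp, by simp, fun a ha b hb => ?_⟩
    rcases List.mem_singleton.1 hb with rfl
    exact lt_of_le_of_lt (pv_mem_le_last marks hp a ha) hlt
  · rw [PySem.Set.mem_union, PySem.Set.mem_ofList,
      (pvDiffList_concat marks pos).mem_iff, List.mem_append, hdm]

-- `fun pos => attempt(marks, diffs, pos)` of B, named for the proofs
def pvG (order ml : Int) (marks : List Int) (diffs : PySem.Set Int) (pos : Int) :
    Option (List Int) :=
  let news := marks.map (fun m => pos - m)
  if PySem.Set.isdisjoint diffs news then
    pvExtend order ml (marks ++ [pos]) (PySem.Set.union diffs (PySem.Set.ofList news))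
  else none

theorem pv_findSome?_attach {β : Type} (l : List Int) (g : Int → Option β) :
    l.attach.findSome? (fun p => g p.1) = l.findSome? g := by
  induction l with
  | nil => rfl
  | cons a tl ih =>
    rw [List.attach_cons, List.findSome?_cons, List.findSome?_cons]
    rcases g a with _ | r
    · rw [List.findSome?_map, ← ih]
      rfl
    · rfl

theorem pvExtend_eq (order ml : Int) (marks : List Int) (diffs : PySem.Set Int) :
    pvExtend order ml marks diffs =
      if (marks.length : Int) = order then some marks
      else (PySem.List.pyRange (pvLast marks + 1) (ml + 1) 1).findSome?
        (pvG order ml marks diffs) := by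
  rw [pvExtend.eq_def]
  by_cases h : (marks.length : Int) = order
  · rw [if_pos h, if_pos h]
  · rw [if_neg h, if_neg h, ← pv_findSome?_attach]
    rfl

theorem pv_findSome?_pyRange_cons {β : Type} (a b : Int) (g : Int → Option β) (h : a < b) :
    (PySem.List.pyRange a b 1).findSome? g
      = match g a with
        | some r => some r
        | none => (PySem.List.pyRange (a + 1) b 1).findSome? g := by
  rw [PySem.List.pyRange_one_cons h, List.findSome?_cons]
  rfl

-- the joint induction: under the invariant, A's backtracking equals B's recursion
theorem pvEq (order : Int) (n : Nat) :
    (∀ (ml : Int) (marks : List Int) (diffs : PySem.Set Int) (remaining pos : Int),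
      (ml + 1 - pos).toNat ≤ n → pvInv marks diffs → remaining = order - marks.length →
      pvLast marks < pos →
      pvLoopA ml marks remaining pos
        = (PySem.List.pyRange pos (ml + 1) 1).findSome? (pvG order ml marks diffs))
    ∧ (∀ (ml : Int) (marks : List Int) (diffs : PySem.Set Int) (remaining : Int),
      (ml - pvLast marks).toNat ≤ n → pvInv marks diffs → remaining = order - marks.length →
      pvBtA ml marks remaining = pvExtend order ml marks diffs) := by
  induction n with
  | zero =>
    constructor
    · intro ml marks diffs remaining pos hn _ _ _
      have hgt : ¬ pos ≤ ml := by omega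
      rw [pvLoopA.eq_def, dif_neg hgt, PySem.List.pyRange_one_eq_nil (by omega)]
      rfl
    · intro ml marks diffs remaining hn hinv hrem
      rw [pvBtA.eq_def, pvExtend_eq]
      by_cases hr : remaining = 0
      · have hlen : (marks.length : Int) = order := by omega
        rw [if_pos hr, if_pos hlen]
      · have hlen : ¬ (marks.length : Int) = order := by omega
        have hgt : ¬ pvStart marks ≤ ml := by
          rw [pvStart_eq_last marks hinv.1]; omega
        rw [if_neg hr, if_neg hlen, pvLoopA.eq_def, dif_neg hgt,
          PySem.List.pyRange_one_eq_nil (by rw [pvStart_eq_last marks hinv.1] at hgt; omega)]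
        rfl
  | succ n ih =>
    have hloop : ∀ (ml : Int) (marks : List Int) (diffs : PySem.Set Int) (remaining pos : Int),
        (ml + 1 - pos).toNat ≤ n + 1 → pvInv marks diffs → remaining = order - marks.length →
        pvLast marks < pos →
        pvLoopA ml marks remaining pos
          = (PySem.List.pyRange pos (ml + 1) 1).findSome? (pvG order ml marks diffs) := by
      intro ml marks diffs remaining pos hn hinv hrem hpos
      rw [pvLoopA.eq_def]
      by_cases hle : pos ≤ ml
      · rw [dif_pos hle, pv_findSome?_pyRange_cons pos (ml + 1) _ (by omega)]
        have hcheck := pvCheck_agree marks diffs pos hinv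
        by_cases hdis : PySem.Set.isdisjoint diffs (marks.map (fun m => pos - m)) = true
        · have hval : pvIsValidPartial (marks ++ [pos]) = true := by rw [hcheck, hdis]
          have hinv' := pvInv_step marks diffs pos hinv hpos hval
          have hbt : pvBtA ml (marks ++ [pos]) (remaining - 1)
              = pvExtend order ml (marks ++ [pos])
                  (PySem.Set.union diffs (PySem.Set.ofList (marks.map (fun m => pos - m)))) := by
            apply ih.2 ml (marks ++ [pos]) _ (remaining - 1) _ hinv'
            · simp only [List.length_append, List.length_cons, List.length_nil]
              push_cast
              omega
            · rw [pvLast_concat]; omega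
          rw [hval, pvG]
          simp only [if_true, hdis, hbt]
          rcases pvExtend order ml (marks ++ [pos])
              (PySem.Set.union diffs (PySem.Set.ofList (marks.map (fun m => pos - m)))) with _ | r
          · exact ih.1 ml marks diffs remaining (pos + 1) (by omega) hinv hrem (by omega)
          · rfl
        · have hval : pvIsValidPartial (marks ++ [pos]) = false := by
            rw [hcheck]; exact Bool.eq_false_iff.mpr hdis
          rw [hval, pvG]
          simp only [Bool.false_eq_true, if_false, hdis]
          exact ih.1 ml marks diffs remaining (pos + 1) (by omega) hinv hrem (by omega)
      · rw [dif_neg hle, PySem.List.pyRange_one_eq_nil (by omega)]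
        rfl
    refine ⟨hloop, ?_⟩
    intro ml marks diffs remaining hn hinv hrem
    rw [pvBtA.eq_def, pvExtend_eq]
    by_cases hr : remaining = 0
    · have hlen : (marks.length : Int) = order := by omega
      rw [if_pos hr, if_pos hlen]
    · have hlen : ¬ (marks.length : Int) = order := by omega
      rw [if_neg hr, if_neg hlen, ← pvStart_eq_last marks hinv.1]
      apply hloop ml marks diffs remaining (pvStart marks) _ hinv hrem
      · rw [pvStart_eq_last marks hinv.1]; omega
      · rw [pvStart_eq_last marks hinv.1]; omega

-- ===== VERDICT (by name: the statement is the Claim_ definition above) =====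
theorem backtrack_golomb_py_spec : Claim_equal_backtrack_golomb_py := by
  intro order max_length _
  unfold Spec_backtrack_golomb_py backtrack_golomb_py backtrack_golomb_py_alt
  apply (pvEq order (max_length - pvLast [0]).toNat).2
  · exact le_rfl
  · exact ⟨by simp, by simp, by simp [pvDiffList], by simp [PySem.Set.empty, pvDiffList]⟩
  · simp
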